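-- pv_equiv track=rewrite | github.com/Lor-96/OrthoRBH | software/library/doubledictionary.py | gene_name_result
-- ===== SOURCE A (Python) =====
-- def gene_name_result(lista, convertersp1,convertersp2):
--     r={}
--     for pro_trnsc in lista:
--         name1=None
--         name2= None
--         if pro_trnsc[0] in convertersp1.keys():
--             name1= convertersp1.get(pro_trnsc[0])
--         if pro_trnsc[1] in convertersp2.keys():
--             name2=convertersp2.get(pro_trnsc[1])
--             if name1 != None and name2!= None:
--                 r.setdefault(name1,{}).setdefault(name2,[]).append(pro_trnsc)
--     result={}
--     for k,v in r.items():
--         for i,j in v.items():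
--             result.setdefault(k,{}).setdefault(i,len(j))
--
--     return result
-- ===== SOURCE B (Python) =====
-- def gene_name_result(lista, convertersp1, convertersp2):
--     # Single pass: resolve both names, and keep running counts directly
--     # instead of collecting lists of pairs and measuring them afterwards.
--     result = {}
--     for pro_trnsc in lista:
--         name1 = convertersp1.get(pro_trnsc[0])
--         name2 = convertersp2.get(pro_trnsc[1])
--         if name1 is not None and name2 is not None:
--             inner = result.setdefault(name1, {})
--             inner[name2] = inner.get(name2, 0) + 1
--     return result
-- ===== Notes on version B (the rewrite author's own statement) =====
-- stated objective: simpler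
-- what changed: One pass that keeps running integer counts per (name1, name2) replaces A's two-pass scheme of grouping the pairs into nested lists and then reading off their lengths with a second nested loop.
import Mathlib
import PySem

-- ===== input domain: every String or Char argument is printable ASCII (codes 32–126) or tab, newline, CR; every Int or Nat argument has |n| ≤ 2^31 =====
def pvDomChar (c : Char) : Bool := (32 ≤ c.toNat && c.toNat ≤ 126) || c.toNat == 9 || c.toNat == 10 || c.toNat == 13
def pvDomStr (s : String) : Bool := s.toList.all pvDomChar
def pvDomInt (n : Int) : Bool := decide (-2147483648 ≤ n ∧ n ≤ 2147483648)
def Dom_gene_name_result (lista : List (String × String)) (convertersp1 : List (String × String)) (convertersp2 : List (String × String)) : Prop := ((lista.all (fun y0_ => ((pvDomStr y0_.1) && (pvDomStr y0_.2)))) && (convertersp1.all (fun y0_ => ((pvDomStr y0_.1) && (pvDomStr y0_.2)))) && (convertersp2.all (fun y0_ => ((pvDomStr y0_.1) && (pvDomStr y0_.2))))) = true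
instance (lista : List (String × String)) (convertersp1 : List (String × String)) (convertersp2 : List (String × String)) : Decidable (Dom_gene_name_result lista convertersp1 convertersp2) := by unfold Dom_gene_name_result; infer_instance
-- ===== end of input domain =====

-- ===== PORT A =====
-- B replaces A's two passes (group pairs into nested lists, then read off lengths) by one counting pass; objective: simpler.
def gene_name_result (lista : List (String × String)) (convertersp1 : List (String × String)) (convertersp2 : List (String × String)) : List (String × List (String × Int)) :=
  let cd1 : PySem.Dict String String := PySem.Dict.ofList convertersp1
  let cd2 : PySem.Dict String String := PySem.Dict.ofList convertersp2
  -- first loop: r.setdefault(name1, {}).setdefault(name2, []).append(pro_trnsc)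
  let r : PySem.Dict String (PySem.Dict String (List (String × String))) :=
    lista.foldl (fun r pro_trnsc =>
      let name1 : Option String := if cd1.contains pro_trnsc.1 then cd1.get? pro_trnsc.1 else none
      if cd2.contains pro_trnsc.2 then
        let name2 : Option String := cd2.get? pro_trnsc.2
        match name1, name2 with
        | some n1, some n2 =>
            r.insert n1 ((r.getD n1 PySem.Dict.empty).modify n2 [] (fun l => l ++ [pro_trnsc]))
        | _, _ => r
      else r) PySem.Dict.empty
  -- second loop: result.setdefault(k, {}).setdefault(i, len(j))
  let result : PySem.Dict String (PySem.Dict String Int) :=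
    r.items.foldl (fun res kv =>
      kv.2.items.foldl (fun res ij =>
        res.insert kv.1 ((res.getD kv.1 PySem.Dict.empty).setdefault ij.1 (ij.2.length : Int))) res) PySem.Dict.empty
  result.items.map (fun p => (p.1, p.2.items))

-- ===== PORT B =====
def gene_name_result_alt (lista : List (String × String)) (convertersp1 : List (String × String)) (convertersp2 : List (String × String)) : List (String × List (String × Int)) :=
  let cd1 : PySem.Dict String String := PySem.Dict.ofList convertersp1
  let cd2 : PySem.Dict String String := PySem.Dict.ofList convertersp2
  -- single pass: inner = result.setdefault(name1, {}); inner[name2] = inner.get(name2, 0) + 1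
  let result : PySem.Dict String (PySem.Dict String Int) :=
    lista.foldl (fun result pro_trnsc =>
      match cd1.get? pro_trnsc.1 with
      | none => result
      | some n1 =>
        match cd2.get? pro_trnsc.2 with
        | none => result
        | some n2 =>
            result.insert n1 ((result.getD n1 PySem.Dict.empty).modify n2 0 (fun c => c + 1))) PySem.Dict.empty
  result.items.map (fun p => (p.1, p.2.items))

-- ===== PRECONDITION & SPEC =====
def Spec_gene_name_result (lista : List (String × String)) (convertersp1 : List (String × String)) (convertersp2 : List (String × String)) (out : List (String × List (String × Int))) : Prop := out = gene_name_result_alt lista convertersp1 convertersp2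
instance (lista : List (String × String)) (convertersp1 : List (String × String)) (convertersp2 : List (String × String)) (out : List (String × List (String × Int))) : Decidable (Spec_gene_name_result lista convertersp1 convertersp2 out) := by unfold Spec_gene_name_result; infer_instance

-- ===== CLAIM (what is proved, stated in full; the proofs are below) =====
def Claim_equal_gene_name_result : Prop := ∀ (lista : List (String × String)) (convertersp1 : List (String × String)) (convertersp2 : List (String × String)), Dom_gene_name_result lista convertersp1 convertersp2 → Spec_gene_name_result lista convertersp1 convertersp2 (gene_name_result lista convertersp1 convertersp2)

-- ===== LEMMAS AND PROOFS =====

/-- Map a value-transforming function over a dict's items (proof helper). -/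
def pvMapVal {κ ν ν' : Type} [BEq κ] (g : ν → ν') (d : PySem.Dict κ ν) : PySem.Dict κ ν' :=
  ⟨d.items.map (fun p => (p.1, g p.2))⟩

/-- Turn A's dict of grouped-pair lists into B's dict of counts. -/
def pvInnerLen (d : PySem.Dict String (List (String × String))) : PySem.Dict String Int :=
  pvMapVal (fun l => (l.length : Int)) d

def pvMapLen (r : PySem.Dict String (PySem.Dict String (List (String × String)))) :
    PySem.Dict String (PySem.Dict String Int) :=
  pvMapVal pvInnerLen r

theorem pvMapVal_get? {κ ν ν' : Type} [BEq κ] (g : ν → ν') (d : PySem.Dict κ ν) (k : κ) :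
    (pvMapVal g d).get? k = (d.get? k).map g := by
  obtain ⟨l⟩ := d
  induction l with
  | nil => rfl
  | cons p rest ih =>
      obtain ⟨pk, pv⟩ := p
      simp only [pvMapVal, List.map_cons, PySem.Dict.get?_mk_cons]
      split
      · rfl
      · exact ih

theorem pvMapVal_contains {κ ν ν' : Type} [BEq κ] (g : ν → ν') (d : PySem.Dict κ ν) (k : κ) :
    (pvMapVal g d).contains k = d.contains k := by
  rw [PySem.Dict.contains_eq_isSome_get?, PySem.Dict.contains_eq_isSome_get?, pvMapVal_get?]
  cases d.get? k <;> rfl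

theorem pvMapVal_insert {κ ν ν' : Type} [BEq κ] (g : ν → ν') (d : PySem.Dict κ ν) (k : κ) (v : ν) :
    pvMapVal g (d.insert k v) = (pvMapVal g d).insert k (g v) := by
  simp only [PySem.Dict.insert, pvMapVal_contains]
  split
  · simp only [pvMapVal, List.map_map]
    congr 1
    apply List.map_congr_left
    intro p _
    by_cases hp : (p.1 == k) = true <;> simp [Function.comp, hp]
  · simp [pvMapVal]

theorem pvMapVal_getD {κ ν ν' : Type} [BEq κ] (g : ν → ν') (d : PySem.Dict κ ν) (k : κ) (dflt : ν) :
    (pvMapVal g d).getD k (g dflt) = g (d.getD k dflt) := by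
  simp only [PySem.Dict.getD, pvMapVal_get?]
  cases d.get? k <;> rfl

/-- The invariant A's first loop maintains on its grouping dict. -/
def pvInv (r : PySem.Dict String (PySem.Dict String (List (String × String)))) : Prop :=
  r.keys.Nodup ∧ ∀ p ∈ r.items, p.2.items ≠ [] ∧ p.2.keys.Nodup

theorem pvInv_empty : pvInv PySem.Dict.empty := by
  constructor
  · simp [PySem.Dict.keys_empty]
  · intro p hp
    simp [PySem.Dict.empty] at hp

theorem pvInv_getD {r : PySem.Dict String (PySem.Dict String (List (String × String)))}
    (h : pvInv r) (k : String) : (r.getD k PySem.Dict.empty).keys.Nodup := by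
  rw [PySem.Dict.getD_eq_get?_getD]
  cases hg : r.get? k with
  | none => simp [PySem.Dict.keys_empty]
  | some v =>
      have hv := PySem.Dict.mem_items_of_get?_eq_some _ hg
      simpa using (h.2 _ hv).2

theorem items_insert_ne_nil {κ ν : Type} [BEq κ] (d : PySem.Dict κ ν) (k : κ) (v : ν) :
    (d.insert k v).items ≠ [] := by
  simp only [PySem.Dict.insert]
  split
  case isTrue h =>
    intro hc
    simp only [List.map_eq_nil_iff] at hc
    rw [PySem.Dict.contains_eq_isSome_get?] at h
    simp [PySem.Dict.get?, hc] at h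
  case isFalse h => simp

theorem pvInv_step (cd1 cd2 : PySem.Dict String String)
    (r : PySem.Dict String (PySem.Dict String (List (String × String))))
    (h : pvInv r) (pro_trnsc : String × String) :
    pvInv ((fun r pro_trnsc =>
      let name1 : Option String := if cd1.contains pro_trnsc.1 then cd1.get? pro_trnsc.1 else none
      if cd2.contains pro_trnsc.2 then
        let name2 : Option String := cd2.get? pro_trnsc.2
        match name1, name2 with
        | some n1, some n2 =>
            r.insert n1 ((r.getD n1 PySem.Dict.empty).modify n2 [] (fun l => l ++ [pro_trnsc]))
        | _, _ => r
      else r) r pro_trnsc) := by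
  dsimp only
  by_cases h2 : cd2.contains pro_trnsc.2 = true
  · simp only [h2, if_true]
    by_cases h1 : cd1.contains pro_trnsc.1 = true
    · simp only [h1, if_true]
      cases hg1 : cd1.get? pro_trnsc.1 with
      | none => rw [PySem.Dict.contains_eq_isSome_get?, hg1] at h1; simp at h1
      | some n1 =>
          cases hg2 : cd2.get? pro_trnsc.2 with
          | none => rw [PySem.Dict.contains_eq_isSome_get?, hg2] at h2; simp at h2
          | some n2 =>
              refine ⟨PySem.Dict.nodup_keys_insert _ _ _ h.1, ?_⟩
              intro p hp
              rcases (PySem.Dict.mem_items_insert _ _ _ _).1 hp with rfl | ⟨hpr, _⟩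
              · refine ⟨items_insert_ne_nil _ _ _, ?_⟩
                rw [PySem.Dict.keys_modify]
                exact PySem.Dict.nodup_keys_insert _ _ _ (pvInv_getD h n1)
              · exact h.2 p hpr
    · rw [if_neg h1]
      cases hg2 : cd2.get? pro_trnsc.2 <;> exact h
  · rw [if_neg h2]
    exact h

theorem pvInv_fold (cd1 cd2 : PySem.Dict String String) (lista : List (String × String))
    (r : PySem.Dict String (PySem.Dict String (List (String × String)))) (h : pvInv r) :
    pvInv (lista.foldl (fun r pro_trnsc =>
      let name1 : Option String := if cd1.contains pro_trnsc.1 then cd1.get? pro_trnsc.1 else none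
      if cd2.contains pro_trnsc.2 then
        let name2 : Option String := cd2.get? pro_trnsc.2
        match name1, name2 with
        | some n1, some n2 =>
            r.insert n1 ((r.getD n1 PySem.Dict.empty).modify n2 [] (fun l => l ++ [pro_trnsc]))
        | _, _ => r
      else r) r) := by
  induction lista generalizing r with
  | nil => exact h
  | cons x xs ih => exact ih _ (pvInv_step cd1 cd2 r h x)

/-- One step of A's first loop corresponds, through pvMapLen, to one step of B's loop. -/
theorem pvStep_commute (cd1 cd2 : PySem.Dict String String)
    (r : PySem.Dict String (PySem.Dict String (List (String × String))))
    (pro_trnsc : String × String) :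
    pvMapLen ((fun r pro_trnsc =>
      let name1 : Option String := if cd1.contains pro_trnsc.1 then cd1.get? pro_trnsc.1 else none
      if cd2.contains pro_trnsc.2 then
        let name2 : Option String := cd2.get? pro_trnsc.2
        match name1, name2 with
        | some n1, some n2 =>
            r.insert n1 ((r.getD n1 PySem.Dict.empty).modify n2 [] (fun l => l ++ [pro_trnsc]))
        | _, _ => r
      else r) r pro_trnsc)
    = (fun result pro_trnsc =>
      match cd1.get? pro_trnsc.1 with
      | none => result
      | some n1 =>
        match cd2.get? pro_trnsc.2 with
        | none => result
        | some n2 =>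
            result.insert n1 ((result.getD n1 PySem.Dict.empty).modify n2 0 (fun c => c + 1))) (pvMapLen r) pro_trnsc := by
  dsimp only
  by_cases h2 : cd2.contains pro_trnsc.2 = true
  · simp only [h2, if_true]
    by_cases h1 : cd1.contains pro_trnsc.1 = true
    · simp only [h1, if_true]
      cases hg1 : cd1.get? pro_trnsc.1 with
      | none => rw [PySem.Dict.contains_eq_isSome_get?, hg1] at h1
      | some n1 =>
          cases hg2 : cd2.get? pro_trnsc.2 with
          | none => rw [PySem.Dict.contains_eq_isSome_get?, hg2] at h2
          | some n2 =>
              have key : ∀ d : PySem.Dict String (List (String × String)),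
                  pvInnerLen (d.modify n2 [] (fun l => l ++ [pro_trnsc]))
                  = (pvInnerLen d).modify n2 0 (fun c => c + 1) := by
                intro d
                show pvInnerLen (d.insert n2 (d.getD n2 [] ++ [pro_trnsc]))
                    = (pvInnerLen d).insert n2 ((pvInnerLen d).getD n2 0 + 1)
                unfold pvInnerLen
                rw [pvMapVal_insert]
                congr 1
                rw [show (0 : Int) = ((([] : List (String × String)).length : Int)) from rfl,
                  pvMapVal_getD]
                simp
              show pvMapVal pvInnerLen
                  (r.insert n1 ((r.getD n1 PySem.Dict.empty).modify n2 [] (fun l => l ++ [pro_trnsc])))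
                  = (pvMapLen r).insert n1
                      (((pvMapLen r).getD n1 PySem.Dict.empty).modify n2 0 (fun c => c + 1))
              rw [pvMapVal_insert, key]
              have hgd : (pvMapLen r).getD n1 PySem.Dict.empty
                  = pvInnerLen (r.getD n1 PySem.Dict.empty) :=
                pvMapVal_getD pvInnerLen r n1 PySem.Dict.empty
              rw [hgd]
              rfl
    · rw [if_neg h1]
      rw [PySem.Dict.contains_eq_isSome_get?] at h1
      cases hg2 : cd2.get? pro_trnsc.2 with
      | none => cases hg1 : cd1.get? pro_trnsc.1 <;> rfl
      | some n2 =>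
          cases hg1 : cd1.get? pro_trnsc.1 with
          | none => rfl
          | some n1 => rw [hg1] at h1; simp at h1
  · rw [if_neg h2]
    rw [PySem.Dict.contains_eq_isSome_get?] at h2
    cases hg2 : cd2.get? pro_trnsc.2 with
    | none => cases hg1 : cd1.get? pro_trnsc.1 <;> rfl
    | some n2 => rw [hg2] at h2; simp at h2

theorem pvFold_commute (cd1 cd2 : PySem.Dict String String) (lista : List (String × String))
    (r : PySem.Dict String (PySem.Dict String (List (String × String)))) :
    pvMapLen (lista.foldl (fun r pro_trnsc =>
      let name1 : Option String := if cd1.contains pro_trnsc.1 then cd1.get? pro_trnsc.1 else none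
      if cd2.contains pro_trnsc.2 then
        let name2 : Option String := cd2.get? pro_trnsc.2
        match name1, name2 with
        | some n1, some n2 =>
            r.insert n1 ((r.getD n1 PySem.Dict.empty).modify n2 [] (fun l => l ++ [pro_trnsc]))
        | _, _ => r
      else r) r)
    = lista.foldl (fun result pro_trnsc =>
      match cd1.get? pro_trnsc.1 with
      | none => result
      | some n1 =>
        match cd2.get? pro_trnsc.2 with
        | none => result
        | some n2 =>
            result.insert n1 ((result.getD n1 PySem.Dict.empty).modify n2 0 (fun c => c + 1))) (pvMapLen r) := by
  induction lista generalizing r with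
  | nil => rfl
  | cons x xs ih => rw [List.foldl_cons, List.foldl_cons, ih, pvStep_commute]

/-- Repeated 'res.insert k …' collapses: the inner fold of A's second loop,
    started just after an insert at k, only rewrites the entry at k. -/
theorem pvInner_shift (l : List (String × List (String × String))) (k : String)
    (res : PySem.Dict String (PySem.Dict String Int)) (d : PySem.Dict String Int) :
    l.foldl (fun res ij =>
        res.insert k ((res.getD k PySem.Dict.empty).setdefault ij.1 (ij.2.length : Int)))
      (res.insert k d)
    = res.insert k (l.foldl (fun d ij => d.setdefault ij.1 (ij.2.length : Int)) d) := by
  induction l generalizing d with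
  | nil => rfl
  | cons ij rest ih =>
      rw [List.foldl_cons, PySem.Dict.getD_insert_self, PySem.Dict.insert_insert_self,
        List.foldl_cons, ih]

/-- A setdefault-fold over fresh distinct keys appends the corresponding items. -/
theorem pvSetdefault_build (l : List (String × List (String × String)))
    (d : PySem.Dict String Int) (hnd : (l.map (fun p => p.1)).Nodup)
    (hfresh : ∀ k ∈ l.map (fun p => p.1), d.contains k = false) :
    l.foldl (fun d ij => d.setdefault ij.1 (ij.2.length : Int)) d
    = ⟨d.items ++ l.map (fun ij => (ij.1, (ij.2.length : Int)))⟩ := by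
  induction l generalizing d with
  | nil => simp
  | cons ij rest ih =>
      obtain ⟨i, j⟩ := ij
      simp only [List.map_cons, List.nodup_cons] at hnd
      have hfi : d.contains i = false := hfresh i (by simp)
      have hfr : ∀ k ∈ rest.map (fun p => p.1),
          (d.insert i (j.length : Int)).contains k = false := by
        intro k hk
        have hki : k ≠ i := fun he => hnd.1 (he ▸ hk)
        rw [PySem.Dict.contains_insert, beq_eq_false_iff_ne.mpr hki, Bool.false_or]
        exact hfresh k (by simp [hk])
      rw [List.foldl_cons, PySem.Dict.setdefault_of_not_contains _ _ hfi,
        ih _ hnd.2 hfr, PySem.Dict.items_insert_of_not_contains _ _ hfi]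
      simp

/-- One outer iteration of A's second loop installs innerLen v at a fresh key k. -/
theorem pvOuter_step (k : String) (v : PySem.Dict String (List (String × String)))
    (res : PySem.Dict String (PySem.Dict String Int))
    (hne : v.items ≠ []) (hnd : v.keys.Nodup) (hfresh : res.contains k = false) :
    v.items.foldl (fun res ij =>
        res.insert k ((res.getD k PySem.Dict.empty).setdefault ij.1 (ij.2.length : Int))) res
    = res.insert k (pvInnerLen v) := by
  rcases hl : v.items with _ | ⟨ij, rest⟩
  · exact absurd hl hne
  · have hb := pvSetdefault_build (ij :: rest) PySem.Dict.empty
      (by simpa [PySem.Dict.keys, hl] using hnd) (fun k _ => PySem.Dict.contains_empty k)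
    rw [List.foldl_cons] at hb
    rw [List.foldl_cons, PySem.Dict.getD_of_not_contains _ _ hfresh, pvInner_shift, hb]
    simp [pvInnerLen, pvMapVal, hl, PySem.Dict.empty]

/-- A's whole second loop, generalized over the accumulator. -/
theorem pvOuter_build (l : List (String × PySem.Dict String (List (String × String))))
    (res : PySem.Dict String (PySem.Dict String Int))
    (hnd : (l.map (fun p => p.1)).Nodup)
    (hfresh : ∀ k ∈ l.map (fun p => p.1), res.contains k = false)
    (hin : ∀ p ∈ l, p.2.items ≠ [] ∧ p.2.keys.Nodup) :
    l.foldl (fun res kv =>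
      kv.2.items.foldl (fun res ij =>
        res.insert kv.1 ((res.getD kv.1 PySem.Dict.empty).setdefault ij.1 (ij.2.length : Int))) res) res
    = ⟨res.items ++ l.map (fun p => (p.1, pvInnerLen p.2))⟩ := by
  induction l generalizing res with
  | nil => simp
  | cons kv rest ih =>
      obtain ⟨k, v⟩ := kv
      simp only [List.map_cons, List.nodup_cons] at hnd
      have hfk : res.contains k = false := hfresh k (by simp)
      have hfr : ∀ k' ∈ rest.map (fun p => p.1),
          (res.insert k (pvInnerLen v)).contains k' = false := by
        intro k' hk'
        have hki : k' ≠ k := fun he => hnd.1 (he ▸ hk')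
        rw [PySem.Dict.contains_insert, beq_eq_false_iff_ne.mpr hki, Bool.false_or]
        exact hfresh k' (by simp [hk'])
      rw [List.foldl_cons]
      rw [pvOuter_step k v res (hin (k, v) (by simp)).1 (hin (k, v) (by simp)).2 hfk]
      rw [ih _ hnd.2 hfr (fun p hp => hin p (by simp [hp])),
        PySem.Dict.items_insert_of_not_contains _ _ hfk]
      simp

theorem pvSecondLoop_eq (r : PySem.Dict String (PySem.Dict String (List (String × String))))
    (h : pvInv r) :
    r.items.foldl (fun res kv =>
      kv.2.items.foldl (fun res ij =>
        res.insert kv.1 ((res.getD kv.1 PySem.Dict.empty).setdefault ij.1 (ij.2.length : Int))) res)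
      PySem.Dict.empty
    = pvMapLen r := by
  rw [pvOuter_build r.items PySem.Dict.empty (by simpa [PySem.Dict.keys] using h.1)
    (fun k _ => PySem.Dict.contains_empty k) h.2]
  rfl

-- ===== VERDICT (by name: the statement is the Claim_ definition above) =====
theorem gene_name_result_spec : Claim_equal_gene_name_result := by
  intro lista convertersp1 convertersp2 _dom
  unfold Spec_gene_name_result gene_name_result gene_name_result_alt
  dsimp only
  rw [pvSecondLoop_eq _ (pvInv_fold _ _ _ _ pvInv_empty), pvFold_commute]
  rfl
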